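-- pv_equiv track=rewrite | github.com/tyleralc/DSCI_550_Data_Geeks | question_5_hw_1.py | temp_weather
-- ===== SOURCE A (Python) =====
-- def temp_weather(all_county, all_state, temp_lst, county_list, state_list):
--   temp_match = []
--   for i in range(len(county_list)):
--     for j in range(len(all_county)):
--       if county_list[i] == all_county[j] and state_list[i] == all_state[j]:
--         temp_match.append(temp_lst[j])
--     if len(temp_match) == i:
--       temp_match.append('NaN')
--   return temp_match
-- ===== SOURCE B (Python) =====
-- def temp_weather(all_county, all_state, temp_lst, county_list, state_list):
--   # Group reference rows by county, then by state: one pass over the data,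
--   # then each query is two dict lookups instead of a scan of all rows.
--   by_county = {}
--   for county, state, temp in zip(all_county, all_state, temp_lst):
--     by_county.setdefault(county, {}).setdefault(state, []).append(temp)
--   temp_match = []
--   for i in range(len(county_list)):
--     states = by_county.get(county_list[i])
--     if states is not None:
--       temp_match += states.get(state_list[i], [])
--     if len(temp_match) == i:
--       temp_match.append('NaN')
--   return temp_match
-- ===== Notes on version B (the rewrite author's own statement) =====
-- stated objective: faster
-- what changed: B replaces A's inner scan of all reference rows per query by a one-pass grouping of (county, state) -> temps into a nested dict, so each query is two dict lookups; the NaN padding rule is kept unchanged.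
import Mathlib
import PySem

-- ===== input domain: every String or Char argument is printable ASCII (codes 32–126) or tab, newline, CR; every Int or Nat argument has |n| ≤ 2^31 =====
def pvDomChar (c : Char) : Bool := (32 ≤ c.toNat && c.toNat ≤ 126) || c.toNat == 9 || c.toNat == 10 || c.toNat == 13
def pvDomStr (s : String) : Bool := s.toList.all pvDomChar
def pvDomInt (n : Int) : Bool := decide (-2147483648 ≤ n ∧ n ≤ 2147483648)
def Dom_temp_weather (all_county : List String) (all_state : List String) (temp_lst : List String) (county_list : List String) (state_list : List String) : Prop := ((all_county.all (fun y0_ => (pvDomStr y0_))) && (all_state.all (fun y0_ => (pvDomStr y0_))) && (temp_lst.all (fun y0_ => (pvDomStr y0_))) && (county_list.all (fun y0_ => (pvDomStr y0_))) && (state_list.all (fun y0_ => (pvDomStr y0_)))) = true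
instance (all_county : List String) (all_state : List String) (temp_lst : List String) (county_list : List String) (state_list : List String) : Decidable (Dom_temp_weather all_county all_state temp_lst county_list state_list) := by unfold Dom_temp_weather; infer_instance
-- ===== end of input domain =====

-- B groups the reference rows (county -> state -> temps) in one pass and answers each
-- query by two dict lookups instead of A's scan of every reference row per query;
-- A's 'NaN' padding rule is kept unchanged.

-- ===== PORT A =====
-- loop counters come from range(len(..)), so they are Nat and in range; Python
-- indexing xs[i] is List.getD i "" there (exact on every index Pre_ admits).
def temp_weather (all_county : List String) (all_state : List String) (temp_lst : List String) (county_list : List String) (state_list : List String) : List String :=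
  (List.range county_list.length).foldl (fun temp_match i =>
    let temp_match :=
      (List.range all_county.length).foldl (fun tm j =>
        if county_list.getD i "" = all_county.getD j "" ∧ state_list.getD i "" = all_state.getD j "" then
          tm ++ [temp_lst.getD j ""]
        else tm) temp_match
    if temp_match.length = i then temp_match ++ ["NaN"] else temp_match) []

-- ===== PORT B =====
-- by_county.setdefault(c, {}).setdefault(s, []).append(t)  ==  two nested Dict.modify
def twBuild (pairs : List ((String × String) × String)) : PySem.Dict String (PySem.Dict String (List String)) :=
  pairs.foldl (fun d p =>
    d.modify p.1.1 PySem.Dict.empty (fun inner => inner.modify p.1.2 [] (· ++ [p.2])))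
    PySem.Dict.empty

def temp_weather_alt (all_county : List String) (all_state : List String) (temp_lst : List String) (county_list : List String) (state_list : List String) : List String :=
  let by_county := twBuild ((all_county.zip all_state).zip temp_lst)
  (List.range county_list.length).foldl (fun temp_match i =>
    let temp_match :=
      match by_county.get? (county_list.getD i "") with
      | some states => temp_match ++ states.getD (state_list.getD i "") []
      | none => temp_match
    if temp_match.length = i then temp_match ++ ["NaN"] else temp_match) []

-- ===== PRECONDITION & SPEC =====
-- Exactly the inputs on which A raises no IndexError: whenever a queried county equals a
-- reference county, the state/temperature lists must cover the indices A then reads.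
def Pre_temp_weather (all_county : List String) (all_state : List String) (temp_lst : List String) (county_list : List String) (state_list : List String) : Prop :=
  ∀ i, i < county_list.length → ∀ j, j < all_county.length →
    county_list.getD i "" = all_county.getD j "" →
    j < all_state.length ∧ i < state_list.length ∧
      (state_list.getD i "" = all_state.getD j "" → j < temp_lst.length)
instance (all_county : List String) (all_state : List String) (temp_lst : List String) (county_list : List String) (state_list : List String) : Decidable (Pre_temp_weather all_county all_state temp_lst county_list state_list) := by unfold Pre_temp_weather; infer_instance

def pvWitness_temp_weather : List String × List String × List String × List String × List String :=
  (["a", "b"], ["s", "t"], ["5", "7"], ["a", "z"], ["s", "t"])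

def Spec_temp_weather (all_county : List String) (all_state : List String) (temp_lst : List String) (county_list : List String) (state_list : List String) (out : List String) : Prop := out = temp_weather_alt all_county all_state temp_lst county_list state_list
instance (all_county : List String) (all_state : List String) (temp_lst : List String) (county_list : List String) (state_list : List String) (out : List String) : Decidable (Spec_temp_weather all_county all_state temp_lst county_list state_list out) := by unfold Spec_temp_weather; infer_instance

-- ===== CLAIM (what is proved, stated in full; the proofs are below) =====
def Claim_equal_temp_weather : Prop := ∀ (all_county : List String) (all_state : List String) (temp_lst : List String) (county_list : List String) (state_list : List String), Dom_temp_weather all_county all_state temp_lst county_list state_list → Pre_temp_weather all_county all_state temp_lst county_list state_list → Spec_temp_weather all_county all_state temp_lst county_list state_list (temp_weather all_county all_state temp_lst county_list state_list)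

-- ===== LEMMAS AND PROOFS =====

-- what one query reads out of the nested dict
def twGetList (d : PySem.Dict String (PySem.Dict String (List String))) (c s : String) : List String :=
  (d.getD c PySem.Dict.empty).getD s []

theorem twGetList_build (c s : String) (ps : List ((String × String) × String)) :
    ∀ d, twGetList (ps.foldl (fun d p =>
        d.modify p.1.1 PySem.Dict.empty (fun inner => inner.modify p.1.2 [] (· ++ [p.2]))) d) c s
      = twGetList d c s ++ (ps.filter (fun p => decide (c = p.1.1 ∧ s = p.1.2))).map (·.2) := by
  induction ps with
  | nil => intro d; simp
  | cons p ps ih =>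
      intro d
      rw [List.foldl_cons, ih, List.filter_cons]
      have hstep : twGetList (d.modify p.1.1 PySem.Dict.empty (fun inner => inner.modify p.1.2 [] (· ++ [p.2]))) c s
          = twGetList d c s ++ (if c = p.1.1 ∧ s = p.1.2 then [p.2] else []) := by
        unfold twGetList
        rw [PySem.Dict.getD_modify]
        by_cases hc : c = p.1.1
        · rw [if_pos hc, PySem.Dict.getD_modify]
          by_cases hs : s = p.1.2
          · simp [hc, hs]
          · simp [hc, hs]
        · simp [hc]
      rw [hstep]
      by_cases h : c = p.1.1 ∧ s = p.1.2
      · simp [h, List.append_assoc]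
      · simp [h]

theorem twFilter_range_shrink (P : Nat → Bool) (m n : Nat) (hmn : m ≤ n)
    (h0 : ∀ j, m ≤ j → j < n → P j = false) :
    (List.range n).filter P = (List.range m).filter P := by
  induction n, hmn using Nat.le_induction with
  | base => rfl
  | succ n hmn ih =>
      rw [List.range_succ, List.filter_append]
      have : P n = false := h0 n (by omega) (by omega)
      simp [this]
      exact ih (fun j h1 h2 => h0 j h1 (by omega))

theorem twRange_filter_map_eq {α β : Type} (ps : List α) (P : Nat → Bool) (f : Nat → β)
    (Q : α → Bool) (g : α → β)
    (hP : ∀ j (h : j < ps.length), P j = Q ps[j])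
    (hf : ∀ j (h : j < ps.length), f j = g ps[j]) :
    ((List.range ps.length).filter P).map f = (ps.filter Q).map g := by
  induction ps using List.reverseRecOn with
  | nil => simp
  | append_singleton ps a ih =>
      rw [List.length_append, List.length_singleton, List.range_succ,
        List.filter_append, List.filter_append, List.map_append, List.map_append]
      have h1 : ((List.range ps.length).filter P).map f = (ps.filter Q).map g := by
        refine ih (fun j h => ?_) (fun j h => ?_)
        · rw [hP j (by simp; omega)]; congr 1; rw [List.getElem_append_left h]
        · rw [hf j (by simp; omega)]; congr 1; rw [List.getElem_append_left h]
      have ha : P ps.length = Q a := by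
        have := hP ps.length (by simp)
        simpa using this
      have hfa : f ps.length = g a := by
        have := hf ps.length (by simp)
        simpa using this
      rw [h1]
      by_cases hq : Q a = true
      · simp [hq, ha ▸ hq, hfa]
      · simp at hq; simp [hq, ha ▸ hq]

theorem temp_weather_spec : Claim_equal_temp_weather := by
  intro ac as tl cl sl _ hpre
  unfold Spec_temp_weather temp_weather temp_weather_alt
  apply PySem.List.foldl_congr_mem
  intro tm i hi
  rw [List.mem_range] at hi
  set c := cl.getD i "" with hc
  set s := sl.getD i "" with hs
  -- the inner loop of A collects exactly what B's nested dict stores under (c, s)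
  have hA : (List.range ac.length).foldl (fun tm j =>
      if c = ac.getD j "" ∧ s = as.getD j "" then tm ++ [tl.getD j ""] else tm) tm
      = tm ++ ((List.range ac.length).filter
          (fun j => decide (c = ac.getD j "" ∧ s = as.getD j ""))).map (fun j => tl.getD j "") :=
    PySem.List.foldl_append_ite _ _ _ _
  set pairs : List ((String × String) × String) := (ac.zip as).zip tl with hpairs
  have hplen : pairs.length = min (min ac.length as.length) tl.length := by
    simp [hpairs]
  have hple : pairs.length ≤ ac.length := by omega
  have hshrink : (List.range ac.length).filter
      (fun j => decide (c = ac.getD j "" ∧ s = as.getD j ""))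
      = (List.range pairs.length).filter
      (fun j => decide (c = ac.getD j "" ∧ s = as.getD j "")) := by
    apply twFilter_range_shrink _ _ _ hple
    intro j h1 h2
    simp only [decide_eq_false_iff_not]
    rintro ⟨hcj, hsj⟩
    have := hpre i hi j h2 hcj
    have : j < tl.length := this.2.2 hsj
    have : j < as.length := (hpre i hi j h2 hcj).1
    omega
  have hpget : ∀ j (h : j < pairs.length), pairs[j] = ((ac[j]'(by omega), as[j]'(by omega)), tl[j]'(by omega)) := by
    intro j h
    simp [hpairs, List.getElem_zip]
  have hmain : ((List.range pairs.length).filter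
      (fun j => decide (c = ac.getD j "" ∧ s = as.getD j ""))).map (fun j => tl.getD j "")
      = (pairs.filter (fun p => decide (c = p.1.1 ∧ s = p.1.2))).map (·.2) := by
    apply twRange_filter_map_eq
    · intro j h
      rw [hpget j h]
      have e1 : ac.getD j "" = ac[j]'(by omega) := List.getD_eq_getElem ac "" (by omega)
      have e2 : as.getD j "" = as[j]'(by omega) := List.getD_eq_getElem as "" (by omega)
      rw [e1, e2]
    · intro j h
      rw [hpget j h]
      exact List.getD_eq_getElem tl "" (by omega)
  have hB : (match (twBuild pairs).get? c with
      | some states => tm ++ states.getD s []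
      | none => tm)
      = tm ++ twGetList (twBuild pairs) c s := by
    unfold twGetList
    cases hg : (twBuild pairs).get? c with
    | none => simp [PySem.Dict.getD_eq_get?_getD, hg]
    | some states => simp [PySem.Dict.getD_eq_get?_getD, hg]
  have hbuild : twGetList (twBuild pairs) c s
      = (pairs.filter (fun p => decide (c = p.1.1 ∧ s = p.1.2))).map (·.2) := by
    unfold twBuild
    rw [twGetList_build]
    simp [twGetList]
  rw [hA, hB, hbuild, hshrink, hmain]

-- ===== VERDICT (by name: the statement is the Claim_ definition above) =====
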